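-- pv_equiv track=rewrite | github.com/felipegbot/rsa-py-project | aux.py | calculaCoprimos
-- ===== SOURCE A (Python) =====
-- def calculaMDC(num1: int, num2: int):
--     # Algoritmo de Euclides para encontrar o MDC entre dois números
--     # De maneira recursiva realiza divisões sucessivas até encontrar o maior divisor comum
--     if num2 == 0:
--         return num1
--     return calculaMDC(num2, num1 % num2)
--
-- def calculaCoprimos(primeiroNumero: int):
--     coprimos = []
--     for i in range(1, primeiroNumero):
--         # Se o MDC entre os dois números for 1, então são primos entre si
--         if len(coprimos) > 200:
--             break
--         if calculaMDC(primeiroNumero, i) == 1: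
--             coprimos.append(i)
--     return coprimos
-- ===== SOURCE B (Python) =====
-- def calculaCoprimos(primeiroNumero: int):
--     # One-time trial-division factorization, then a divisibility test per candidate
--     # instead of a Euclid gcd per candidate.
--     fatores = []
--     m = primeiroNumero
--     f = 2
--     while f * f <= m:
--         if m % f == 0:
--             fatores.append(f)
--             while m % f == 0:
--                 m //= f
--         f += 1
--     if m > 1:
--         fatores.append(m)
--     coprimos = []
--     for i in range(1, primeiroNumero):
--         if len(coprimos) > 200:
--             break
--         if all(i % p != 0 for p in fatores):
--             coprimos.append(i)
--     return coprimos
-- ===== Notes on version B (the rewrite author's own statement) =====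
-- stated objective: alternative
-- what changed: B factorizes n once by trial division and tests each candidate for divisibility by n's distinct prime factors, instead of running a recursive Euclid gcd per candidate; the early cutoff of the scan makes both versions fast in practice, so no speed is claimed.
import Mathlib
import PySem

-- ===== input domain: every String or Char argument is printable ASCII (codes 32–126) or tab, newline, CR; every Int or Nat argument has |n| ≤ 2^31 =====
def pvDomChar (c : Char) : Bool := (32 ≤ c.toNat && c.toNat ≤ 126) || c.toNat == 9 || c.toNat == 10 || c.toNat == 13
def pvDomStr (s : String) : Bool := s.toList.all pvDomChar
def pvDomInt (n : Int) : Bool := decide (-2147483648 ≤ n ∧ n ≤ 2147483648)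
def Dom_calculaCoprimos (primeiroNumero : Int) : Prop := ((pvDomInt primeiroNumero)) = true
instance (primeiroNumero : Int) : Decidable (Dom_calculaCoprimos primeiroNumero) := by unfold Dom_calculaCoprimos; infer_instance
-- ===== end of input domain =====

-- B replaces the per-candidate Euclid gcd with a one-time trial-division factorization of n
-- followed by a prime-divisibility test per candidate.

-- ===== PORT A =====
-- recursive Euclid; the fuel is a totality guard only (|num2| shrinks every call,
-- so `num2.natAbs + 1` steps always suffice and the 0-fuel branch is never reached)
def mdcGo : Nat → Int → Int → Int
  | 0, num1, _ => num1
  | fuel + 1, num1, num2 =>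
    if num2 = 0 then num1
    else mdcGo fuel num2 (PySem.Int.mod num1 num2)

def calculaMDC (num1 num2 : Int) : Int := mdcGo (num2.natAbs + 1) num1 num2

-- `for i in range(1, n)` counting upward; the fuel `(n-1).toNat` is exactly the
-- number of values the range yields
def cpLoopA (n : Int) (acc : List Int) (i : Int) : Nat → List Int
  | 0 => acc
  | fuel + 1 =>
    if acc.length > 200 then acc
    else if calculaMDC n i = 1 then cpLoopA n (acc ++ [i]) (i + 1) fuel
    else cpLoopA n acc (i + 1) fuel

def calculaCoprimos (primeiroNumero : Int) : List Int :=
  cpLoopA primeiroNumero [] 1 (primeiroNumero - 1).toNat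

-- ===== PORT B =====
-- inner `while m % f == 0: m //= f` of Source B; the fuel is a totality guard only
-- (m strictly shrinks each division, so `m.toNat` steps always suffice)
def divOutGo : Nat → Int → Int → Int
  | 0, m, _ => m
  | fuel + 1, m, f =>
    if PySem.Int.mod m f = 0 then divOutGo fuel (PySem.Int.floordiv m f) f
    else m

-- outer `while f * f <= m` loop of Source B; fuel is a totality guard only
-- (f grows by 1 each iteration and stays ≤ m while looping)
def factGo : Nat → Int → Int → List Int
  | 0, m, _ => if 1 < m then [m] else []
  | fuel + 1, m, f =>
    if f * f ≤ m then
      if PySem.Int.mod m f = 0 then f :: factGo fuel (divOutGo m.toNat m f) (f + 1)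
      else factGo fuel m (f + 1)
    else if 1 < m then [m] else []

def cpLoopB (fs : List Int) (acc : List Int) (i : Int) : Nat → List Int
  | 0 => acc
  | fuel + 1 =>
    if acc.length > 200 then acc
    else if fs.all (fun p => PySem.Int.mod i p != 0) then cpLoopB fs (acc ++ [i]) (i + 1) fuel
    else cpLoopB fs acc (i + 1) fuel

def calculaCoprimos_alt (primeiroNumero : Int) : List Int :=
  let fatores := factGo (primeiroNumero.toNat + 1) primeiroNumero 2
  cpLoopB fatores [] 1 (primeiroNumero - 1).toNat

-- ===== PRECONDITION & SPEC =====
def Spec_calculaCoprimos (primeiroNumero : Int) (out : List Int) : Prop := out = calculaCoprimos_alt primeiroNumero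
instance (primeiroNumero : Int) (out : List Int) : Decidable (Spec_calculaCoprimos primeiroNumero out) := by unfold Spec_calculaCoprimos; infer_instance

-- ===== CLAIM (what is proved, stated in full; the proofs are below) =====
def Claim_equal_calculaCoprimos : Prop := ∀ (primeiroNumero : Int), Dom_calculaCoprimos primeiroNumero → Spec_calculaCoprimos primeiroNumero (calculaCoprimos primeiroNumero)

-- ===== LEMMAS AND PROOFS =====

-- Nat-level models of B's two loops (proof-only helpers)
def pvDivOutN (m f : Nat) : Nat :=
  if 2 ≤ f ∧ 1 ≤ m ∧ m % f = 0 then pvDivOutN (m / f) f else m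
termination_by m
decreasing_by
  rename_i h
  exact Nat.div_lt_self (by omega) (by omega)

theorem pvDivOutN_pos (m f : Nat) (hm : 1 ≤ m) : 1 ≤ pvDivOutN m f := by
  fun_induction pvDivOutN m f with
  | case1 m h ih =>
    obtain ⟨hf, hm1, hmod⟩ := h
    have hdvd : f ∣ m := Nat.dvd_of_mod_eq_zero hmod
    exact ih ((Nat.one_le_div_iff (by omega)).mpr (Nat.le_of_dvd (by omega) hdvd))
  | case2 => omega

theorem pvDivOutN_dvd (m f : Nat) : pvDivOutN m f ∣ m := by
  fun_induction pvDivOutN m f with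
  | case1 m h ih =>
    obtain ⟨hf, hm1, hmod⟩ := h
    exact ih.trans (Nat.div_dvd_of_dvd (Nat.dvd_of_mod_eq_zero hmod))
  | case2 => exact dvd_rfl

theorem pvDivOutN_not_dvd (m f : Nat) (hf : 2 ≤ f) (hm : 1 ≤ m) : ¬ f ∣ pvDivOutN m f := by
  fun_induction pvDivOutN m f with
  | case1 m h ih =>
    obtain ⟨hf', hm1, hmod⟩ := h
    have hdvd : f ∣ m := Nat.dvd_of_mod_eq_zero hmod
    exact ih ((Nat.one_le_div_iff (by omega)).mpr (Nat.le_of_dvd (by omega) hdvd))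
  | case2 m h =>
    intro hdvd
    exact h ⟨hf, hm, Nat.dvd_iff_mod_eq_zero.mp hdvd⟩

theorem pvDivOutN_lt (m f : Nat) (hf : 2 ≤ f) (hm : 1 ≤ m) (hmod : m % f = 0) :
    pvDivOutN m f < m := by
  have h1 : pvDivOutN m f ∣ m / f := by
    rw [pvDivOutN, if_pos ⟨hf, hm, hmod⟩]; exact pvDivOutN_dvd _ _
  have hdvd : f ∣ m := Nat.dvd_of_mod_eq_zero hmod
  have h2 : 1 ≤ m / f := (Nat.one_le_div_iff (by omega)).mpr (Nat.le_of_dvd (by omega) hdvd)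
  have h3 : m / f < m := Nat.div_lt_self (by omega) (by omega)
  exact lt_of_le_of_lt (Nat.le_of_dvd (by omega) h1) h3

theorem coprime_pvDivOutN : ∀ m f i : Nat, 2 ≤ f → 1 ≤ m → f.Prime → f ∣ m →
    (Nat.Coprime m i ↔ (¬ f ∣ i ∧ Nat.Coprime (pvDivOutN m f) i)) := by
  intro m
  induction m using Nat.strong_induction_on with
  | _ m ih =>
    intro f i hf hm hp hd
    have hmod : m % f = 0 := Nat.dvd_iff_mod_eq_zero.mp hd
    rw [pvDivOutN, if_pos ⟨hf, hm, hmod⟩]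
    have hmf : m = f * (m / f) := (Nat.mul_div_cancel' hd).symm
    have h2 : 1 ≤ m / f := (Nat.one_le_div_iff (by omega)).mpr (Nat.le_of_dvd (by omega) hd)
    have hco : Nat.Coprime m i ↔ (Nat.Coprime f i ∧ Nat.Coprime (m / f) i) := by
      conv_lhs => rw [hmf]
      exact Nat.coprime_mul_iff_left
    have hfi : Nat.Coprime f i ↔ ¬ f ∣ i := hp.coprime_iff_not_dvd
    by_cases hdf : f ∣ m / f
    · have := ih (m / f) (Nat.div_lt_self (by omega) (by omega)) f i hf h2 hp hdf
      rw [hco, hfi, this]; tauto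
    · have heq : pvDivOutN (m / f) f = m / f := by
        rw [pvDivOutN, if_neg]
        intro ⟨_, _, hmod'⟩
        exact hdf (Nat.dvd_of_mod_eq_zero hmod')
      rw [hco, hfi, heq]

theorem prime_of_min_div (m f : Nat) (hf : 2 ≤ f) (hd : f ∣ m)
    (hmin : ∀ d, 2 ≤ d → d < f → ¬ d ∣ m) : f.Prime := by
  rw [Nat.prime_def_lt]
  refine ⟨hf, fun d hdlt hdf => ?_⟩
  by_contra hne
  have hd2 : 2 ≤ d := by
    rcases Nat.eq_zero_or_pos d with h0 | h1
    · subst h0; simp at hdf; omega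
    · omega
  exact hmin d hd2 hdlt (hdf.trans hd)

def pvFactorLoopN (m f : Nat) : List Nat :=
  if h : 2 ≤ f ∧ f * f ≤ m then
    if m % f = 0 then f :: pvFactorLoopN (pvDivOutN m f) (f + 1)
    else pvFactorLoopN m (f + 1)
  else if 1 < m then [m] else []
termination_by ((m, m - f) : Nat ×ₗ Nat)
decreasing_by
  · obtain ⟨hf, hff⟩ := h
    have hm : 1 ≤ m := by nlinarith
    exact Prod.Lex.left _ _ (pvDivOutN_lt m f hf hm (by assumption))
  · obtain ⟨hf, hff⟩ := h
    have : f < m := by nlinarith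
    exact Prod.Lex.right _ (by omega)

-- THE key number-theory fact: gcd-with-m test = divisibility-by-prime-factor test
theorem pvFactorLoopN_gcd (m f : Nat) :
    2 ≤ f → 1 ≤ m → (∀ d, 2 ≤ d → d < f → ¬ d ∣ m) →
    ∀ i, (Nat.gcd m i = 1 ↔ ∀ q ∈ pvFactorLoopN m f, ¬ q ∣ i) := by
  fun_induction pvFactorLoopN m f with
  | case1 m f h hmod ih =>
    intro hf hm hmin i
    obtain ⟨hf2, hff⟩ := h
    have hdvd : f ∣ m := Nat.dvd_of_mod_eq_zero hmod
    have hp : f.Prime := prime_of_min_div m f hf2 hdvd hmin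
    have hco := coprime_pvDivOutN m f i hf2 hm hp hdvd
    have hih := ih (by omega) (pvDivOutN_pos m f hm)
      (fun d hd2 hdlt hddvd => by
        rcases Nat.lt_or_ge d f with hlt | hge
        · exact hmin d hd2 hlt (hddvd.trans (pvDivOutN_dvd m f))
        · have hdf : d = f := by omega
          exact pvDivOutN_not_dvd m f hf2 hm (hdf ▸ hddvd)) i
    simp only [List.mem_cons, forall_eq_or_imp]
    rw [show (Nat.gcd m i = 1) = Nat.Coprime m i from rfl, hco]
    rw [show (Nat.gcd (pvDivOutN m f) i = 1) = Nat.Coprime (pvDivOutN m f) i from rfl] at hih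
    tauto
  | case2 m f h hmod ih =>
    intro hf hm hmin i
    exact ih (by omega) hm
      (fun d hd2 hdlt hddvd => by
        rcases Nat.lt_or_ge d f with hlt | hge
        · exact hmin d hd2 hlt hddvd
        · have hdf : d = f := by omega
          exact hmod (Nat.dvd_iff_mod_eq_zero.mp (hdf ▸ hddvd))) i
  | case3 m f h h1 =>
    intro hf hm hmin i
    have hff : m < f * f := by
      rcases Nat.lt_or_ge m (f * f) with h' | h'
      · exact h'
      · exact absurd ⟨hf, h'⟩ h
    have hmp : m.Prime := by
      have hne1 : m ≠ 1 := by omega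
      have hp := Nat.minFac_prime hne1
      have hpd := Nat.minFac_dvd m
      set p := m.minFac with hpdef
      have hpf : f ≤ p := by
        by_contra hlt
        exact hmin p hp.two_le (by omega) hpd
      by_cases hmp : m = p
      · rw [hmp]; exact hp
      · exfalso
        have hq1 : m / p ≠ 1 := by
          intro h'
          have := Nat.div_mul_cancel hpd
          rw [h', one_mul] at this
          exact hmp this.symm
        have hqpos : 1 ≤ m / p := (Nat.one_le_div_iff hp.pos).mpr (Nat.le_of_dvd (by omega) hpd)
        have hq := Nat.minFac_prime hq1
        set q := (m / p).minFac with hqdef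
        have hqd : q ∣ m := (Nat.minFac_dvd _).trans (Nat.div_dvd_of_dvd hpd)
        have hqf : f ≤ q := by
          by_contra hlt
          exact hmin q hq.two_le (by omega) hqd
        have hqle : q ≤ m / p := Nat.minFac_le (by omega)
        have hpqm : p * q ≤ m := by
          calc p * q ≤ p * (m / p) := Nat.mul_le_mul_left _ hqle
            _ = m := Nat.mul_div_cancel' hpd
        nlinarith
    simp only [List.mem_cons, List.not_mem_nil, or_false, forall_eq]
    exact hmp.coprime_iff_not_dvd
  | case4 m f h h1 =>
    intro hf hm hmin i
    have hm1 : m = 1 := by omega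
    subst hm1
    simp [Nat.gcd_one_left]

-- Python % on nonnegative operands is Nat %
theorem int_mod_toNat (a b : Int) (ha : 0 ≤ a) (hb : 0 < b) :
    PySem.Int.mod a b = ((a.toNat % b.toNat : Nat) : Int) := by
  rw [PySem.Int.mod_eq_emod_of_pos hb]
  conv_lhs => rw [← Int.toNat_of_nonneg ha, ← Int.toNat_of_nonneg hb.le, ← Int.natCast_emod]

-- bridge: mdcGo with sufficient fuel on nonnegative ints is Nat.gcd
theorem mdcGo_eq_gcd : ∀ (fuel : Nat) (a b : Int), b.natAbs < fuel → 0 ≤ a → 0 ≤ b →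
    mdcGo fuel a b = ((Nat.gcd b.toNat a.toNat : Nat) : Int) := by
  intro fuel
  induction fuel with
  | zero => intro a b hfu; omega
  | succ k ih =>
    intro a b hfu ha hb
    rw [mdcGo]
    by_cases hb0 : b = 0
    · subst hb0
      simp [Int.toNat_of_nonneg ha]
    · rw [if_neg hb0]
      have hbpos : 0 < b := by omega
      have hmn : 0 ≤ PySem.Int.mod a b := PySem.Int.mod_nonneg a hbpos
      have hml : PySem.Int.mod a b < b := PySem.Int.mod_lt a hbpos
      rw [ih b (PySem.Int.mod a b) (by omega) hb hmn]
      congr 1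
      have htn : (PySem.Int.mod a b).toNat = a.toNat % b.toNat := by
        rw [int_mod_toNat a b ha hbpos, Int.toNat_natCast]
      rw [htn]
      exact (Nat.gcd_rec b.toNat a.toNat).symm

theorem calculaMDC_eq_gcd (a b : Int) (ha : 0 ≤ a) (hb : 0 ≤ b) :
    calculaMDC a b = ((Nat.gcd b.toNat a.toNat : Nat) : Int) := by
  exact mdcGo_eq_gcd (b.natAbs + 1) a b (by omega) ha hb

-- bridge: divOutGo with sufficient fuel on nonnegative ints is pvDivOutN
theorem divOutGo_eq_N : ∀ (fuel : Nat) (m f : Int), 0 ≤ m → 2 ≤ f → m.toNat ≤ fuel →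
    divOutGo fuel m f = ((pvDivOutN m.toNat f.toNat : Nat) : Int) := by
  intro fuel
  induction fuel with
  | zero =>
    intro m f hm hf hfu
    have hm0 : m = 0 := by omega
    subst hm0
    rw [divOutGo, pvDivOutN, if_neg (by omega)]
    rfl
  | succ k ih =>
    intro m f hm hf hfu
    rw [divOutGo]
    by_cases hmod : PySem.Int.mod m f = 0
    · rw [if_pos hmod]
      by_cases hm0 : m = 0
      · subst hm0
        have hfd : PySem.Int.floordiv 0 f = 0 := by
          rw [PySem.Int.floordiv_eq_ediv_of_pos (by omega)]
          simp
        rw [hfd, ih 0 f (by omega) hf (by simp)]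
      · have hm1 : 1 ≤ m := by omega
        have hmodn : m.toNat % f.toNat = 0 := by
          rw [int_mod_toNat m f (by omega) (by omega)] at hmod
          omega
        have hfd : PySem.Int.floordiv m f = ((m.toNat / f.toNat : Nat) : Int) := by
          conv_lhs => rw [← Int.toNat_of_nonneg (by omega : (0:Int) ≤ m),
            ← Int.toNat_of_nonneg (by omega : (0:Int) ≤ f)]
          exact PySem.Int.floordiv_natCast _ _
        have hlt : m.toNat / f.toNat < m.toNat := Nat.div_lt_self (by omega) (by omega)
        rw [hfd, ih _ f (Int.natCast_nonneg _) hf (by rw [Int.toNat_natCast]; omega),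
          Int.toNat_natCast]
        conv_rhs => rw [pvDivOutN, if_pos ⟨by omega, by omega, hmodn⟩]
    · rw [if_neg hmod, pvDivOutN, if_neg]
      · rw [Int.toNat_of_nonneg hm]
      · intro ⟨hf2, hm1, hmodn⟩
        apply hmod
        rw [int_mod_toNat m f (by omega) (by omega), hmodn]
        rfl

-- bridge: factGo with sufficient fuel on nonnegative ints is pvFactorLoopN
theorem factGo_eq_N : ∀ (fuel : Nat) (m f : Int), 0 ≤ m → 2 ≤ f →
    m.toNat + 1 ≤ fuel + f.toNat →
    factGo fuel m f = (pvFactorLoopN m.toNat f.toNat).map (Nat.cast : Nat → Int) := by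
  intro fuel
  induction fuel with
  | zero =>
    intro m f hm hf hfu
    have hmf : m < f := by omega
    have hcn : ¬ (2 ≤ f.toNat ∧ f.toNat * f.toNat ≤ m.toNat) := by
      intro ⟨ha, hb⟩
      have : f.toNat ≤ f.toNat * f.toNat := Nat.le_mul_of_pos_left _ (by omega)
      omega
    rw [factGo, pvFactorLoopN, dif_neg hcn]
    by_cases h1 : 1 < m
    · rw [if_pos h1, if_pos (by omega : 1 < m.toNat), List.map_cons, List.map_nil,
        Int.toNat_of_nonneg hm]
    · rw [if_neg h1, if_neg (by omega : ¬ 1 < m.toNat), List.map_nil]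
  | succ k ih =>
    intro m f hm hf hfu
    rw [factGo]
    by_cases hff : f * f ≤ m
    · rw [if_pos hff]
      have hffn : f.toNat * f.toNat ≤ m.toNat := by
        have hc : (f * f : Int) = ((f.toNat * f.toNat : Nat) : Int) := by
          rw [Nat.cast_mul, Int.toNat_of_nonneg (by omega)]
        omega
      have hm1 : 1 ≤ m := by nlinarith
      have hfm : f ≤ m := le_trans (by nlinarith) hff
      by_cases hmod : PySem.Int.mod m f = 0
      · rw [if_pos hmod]
        have hmodn : m.toNat % f.toNat = 0 := by
          rw [int_mod_toNat m f (by omega) (by omega)] at hmod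
          omega
        have hdo := divOutGo_eq_N m.toNat m f (by omega) hf (le_refl _)
        have hlt : pvDivOutN m.toNat f.toNat < m.toNat :=
          pvDivOutN_lt m.toNat f.toNat (by omega) (by omega) hmodn
        have hf1 : (f + 1).toNat = f.toNat + 1 := by omega
        rw [hdo, ih _ (f + 1) (Int.natCast_nonneg _) (by omega)
          (by rw [Int.toNat_natCast, hf1]; omega), Int.toNat_natCast, hf1]
        conv_rhs => rw [pvFactorLoopN, dif_pos ⟨by omega, hffn⟩, if_pos hmodn]
        rw [List.map_cons, Int.toNat_of_nonneg (by omega : (0:Int) ≤ f)]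
      · rw [if_neg hmod]
        have hmodn : ¬ m.toNat % f.toNat = 0 := by
          intro h0
          apply hmod
          rw [int_mod_toNat m f (by omega) (by omega), h0]
          rfl
        have hf1 : (f + 1).toNat = f.toNat + 1 := by omega
        rw [ih m (f + 1) hm (by omega) (by rw [hf1]; omega), hf1]
        conv_rhs => rw [pvFactorLoopN, dif_pos ⟨by omega, hffn⟩, if_neg hmodn]
    · rw [if_neg hff]
      have hcn : ¬ (2 ≤ f.toNat ∧ f.toNat * f.toNat ≤ m.toNat) := by
        intro ⟨ha, hb⟩
        apply hff
        have hc : (f * f : Int) = ((f.toNat * f.toNat : Nat) : Int) := by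
          rw [Nat.cast_mul, Int.toNat_of_nonneg (by omega)]
        omega
      rw [pvFactorLoopN, dif_neg hcn]
      by_cases h1 : 1 < m
      · rw [if_pos h1, if_pos (by omega : 1 < m.toNat), List.map_cons, List.map_nil,
          Int.toNat_of_nonneg hm]
      · rw [if_neg h1, if_neg (by omega : ¬ 1 < m.toNat), List.map_nil]

-- the two candidate loops agree when the predicates agree on every candidate
theorem loops_eq (n : Int) (fs : List Int)
    (hpt : ∀ i : Int, 1 ≤ i →
      ((calculaMDC n i = 1) ↔ (fs.all (fun p => PySem.Int.mod i p != 0) = true))) :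
    ∀ (fuel : Nat) (i : Int) (acc : List Int), 1 ≤ i →
      cpLoopA n acc i fuel = cpLoopB fs acc i fuel := by
  intro fuel
  induction fuel with
  | zero => intro i acc _; rfl
  | succ k ih =>
    intro i acc hi
    rw [cpLoopA, cpLoopB]
    by_cases hlen : acc.length > 200
    · simp [hlen]
    · simp only [if_neg hlen]
      have hiff := hpt i hi
      by_cases hmdc : calculaMDC n i = 1
      · rw [if_pos hmdc, if_pos (hiff.mp hmdc), ih (i + 1) _ (by omega)]
      · rw [if_neg hmdc, if_neg (fun hb => hmdc (hiff.mpr hb)), ih (i + 1) _ (by omega)]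

-- ===== VERDICT (by name: the statement is the Claim_ definition above) =====
theorem calculaCoprimos_spec : Claim_equal_calculaCoprimos := by
  intro n _
  unfold Spec_calculaCoprimos calculaCoprimos calculaCoprimos_alt
  by_cases hn2 : 2 ≤ n
  case neg =>
    have h0 : (n - 1).toNat = 0 := by omega
    rw [h0]
    rfl
  case pos =>
    apply loops_eq n (factGo (n.toNat + 1) n 2) _ _ 1 [] (by omega)
    intro i hi1
    rw [calculaMDC_eq_gcd n i (by omega) (by omega)]
    have hcast : (((Nat.gcd i.toNat n.toNat : Nat)) : Int) = 1 ↔ Nat.gcd i.toNat n.toNat = 1 := by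
      omega
    rw [hcast, Nat.gcd_comm]
    have hkey := pvFactorLoopN_gcd n.toNat 2 (le_refl 2) (by omega)
      (fun d hd2 hdlt => absurd hdlt (by omega)) i.toNat
    rw [hkey]
    have hfs : factGo (n.toNat + 1) n 2 = (pvFactorLoopN n.toNat 2).map (Nat.cast : Nat → Int) := by
      have := factGo_eq_N (n.toNat + 1) n 2 (by omega) (by omega) (by omega)
      simpa using this
    rw [hfs]
    simp only [List.all_map, List.all_eq_true, Function.comp, bne_iff_ne, ne_eq,
      PySem.Int.mod_eq_zero_iff_dvd]
    constructor
    · intro hall q hq hdq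
      apply hall q hq
      rwa [← Int.toNat_of_nonneg (by omega : (0:Int) ≤ i), Int.natCast_dvd_natCast] at hdq
    · intro hall q hq hdq
      apply hall q hq
      rwa [← Int.toNat_of_nonneg (by omega : (0:Int) ≤ i), Int.natCast_dvd_natCast]
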